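-- pv_equiv track=rewrite | github.com/Minious/advent-of-code-2023 | day17/part1.py | is_path_valid
-- ===== SOURCE A (Python) =====
-- from itertools import groupby
--
-- def is_path_valid(path):
--     dirs = list(tuple(map(lambda i, j: j - i, p1, p2))
--                 for p1, p2 in zip(path[:-1], path[1:]))
--     repeats = (sum(1 for _ in g) for _, g in groupby(dirs))
--     for repeat in repeats:
--         if repeat > 3:
--             return False
--     return True
-- ===== SOURCE B (Python) =====
-- def is_path_valid(path):
--     dirs = [(q[0] - p[0], q[1] - p[1]) for p, q in zip(path, path[1:])]
--     i = 0
--     while i + 3 < len(dirs):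
--         if dirs[i] == dirs[i + 1] == dirs[i + 2] == dirs[i + 3]:
--             return False
--         i += 1
--     return True
-- ===== Notes on version B (the rewrite author's own statement) =====
-- stated objective: simpler
-- what changed: Replaces itertools.groupby run-length grouping with a fixed-size sliding window: a run longer than 3 exists iff four consecutive deltas are equal.
import Mathlib
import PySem

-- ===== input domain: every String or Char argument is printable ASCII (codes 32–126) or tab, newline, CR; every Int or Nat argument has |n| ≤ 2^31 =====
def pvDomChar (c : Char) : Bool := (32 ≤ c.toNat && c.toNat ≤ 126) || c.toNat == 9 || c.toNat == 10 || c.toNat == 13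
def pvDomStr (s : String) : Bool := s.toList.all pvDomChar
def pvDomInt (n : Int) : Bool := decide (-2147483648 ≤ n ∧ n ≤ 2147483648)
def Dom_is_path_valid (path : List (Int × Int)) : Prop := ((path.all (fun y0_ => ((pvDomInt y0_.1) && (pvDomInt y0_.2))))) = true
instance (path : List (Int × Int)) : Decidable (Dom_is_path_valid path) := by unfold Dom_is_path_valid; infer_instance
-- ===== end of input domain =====

-- B replaces itertools.groupby run-length grouping with a fixed window-of-4 scan (simpler; same cost).

-- ===== PORT A =====
-- groupby run lengths: runAuxA carries the current group's element and its count so far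
def runAuxA (a : Int × Int) (n : Nat) : List (Int × Int) → List Nat
  | [] => [n]
  | b :: t => if b = a then runAuxA a (n + 1) t else n :: runAuxA b 1 t

def runLensA : List (Int × Int) → List Nat
  | [] => []
  | a :: t => runAuxA a 1 t

def is_path_valid (path : List (Int × Int)) : Bool :=
  let dirs := List.zipWith (fun p q => (q.1 - p.1, q.2 - p.2))
      (PySem.List.slice path none (some (-1))) (PySem.List.slice path (some 1) none)
  -- 'for repeat in repeats: if repeat > 3: return False' / 'return True'
  if (runLensA dirs).any (fun r => 3 < r) then false else true

-- ===== PORT B =====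
-- the while loop: each step examines the 4-element window at the front and advances by one
def quadScan : List (Int × Int) → Bool
  | a :: b :: c :: d :: t => if a = b ∧ b = c ∧ c = d then false else quadScan (b :: c :: d :: t)
  | _ => true

def is_path_valid_alt (path : List (Int × Int)) : Bool :=
  quadScan (List.zipWith (fun p q => (q.1 - p.1, q.2 - p.2)) path path.tail)

-- ===== PRECONDITION & SPEC =====
def Spec_is_path_valid (path : List (Int × Int)) (out : Bool) : Prop := out = is_path_valid_alt path
instance (path : List (Int × Int)) (out : Bool) : Decidable (Spec_is_path_valid path out) := by unfold Spec_is_path_valid; infer_instance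

-- ===== CLAIM (what is proved, stated in full; the proofs are below) =====
def Claim_equal_is_path_valid : Prop := ∀ (path : List (Int × Int)), Dom_is_path_valid path → Spec_is_path_valid path (is_path_valid path)

-- ===== LEMMAS AND PROOFS =====

-- the two delta lists coincide (zipWith truncates at the shorter list)
theorem zipWith_dropLast_tail {α β : Type} (f : α → α → β) :
    ∀ l : List α, List.zipWith f l.dropLast l.tail = List.zipWith f l l.tail := by
  intro l
  induction l with
  | nil => rfl
  | cons a t ih =>
    cases t with
    | nil => rfl
    | cons b u =>
      simp only [List.dropLast, List.zipWith_cons_cons, List.tail_cons] at *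
      exact congrArg _ ih

-- one step of quadScan: the front window, and the scan of the tail
def headWin : (Int × Int) → List (Int × Int) → Bool
  | x, b :: c :: d :: _ => decide ¬(x = b ∧ b = c ∧ c = d)
  | _, _ => true

theorem quadScan_cons (x : Int × Int) (l : List (Int × Int)) :
    quadScan (x :: l) = (headWin x l && quadScan l) := by
  match l with
  | [] => rfl
  | [b] => rfl
  | [b, c] => rfl
  | b :: c :: d :: t =>
    simp only [quadScan, headWin]
    by_cases h : x = b ∧ b = c ∧ c = d <;> simp [h]

theorem headWin_ne1 {a b : Int × Int} (h : a ≠ b) (t : List (Int × Int)) :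
    headWin a (b :: t) = true := by
  match t with
  | [] => rfl
  | [c] => rfl
  | c :: d :: u => simp [headWin, h]

theorem headWin_ne2 {a b : Int × Int} (h : a ≠ b) (t : List (Int × Int)) :
    headWin a (a :: b :: t) = true := by
  match t with
  | [] => rfl
  | c :: u => simp [headWin, h]

theorem headWin_ne3 {a b : Int × Int} (h : a ≠ b) (t : List (Int × Int)) :
    headWin a (a :: a :: b :: t) = true := by
  simp [headWin, h]

theorem quadScan_replicate (a : Int × Int) (n : Nat) :
    quadScan (List.replicate n a) = !decide (3 < n) := by
  match n with
  | 0 => rfl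
  | 1 => rfl
  | 2 => rfl
  | 3 => rfl
  | Nat.succ (Nat.succ (Nat.succ (Nat.succ m))) =>
    simp only [List.replicate_succ, quadScan]
    simp

-- main invariant: the groupby run-length test agrees with the window scan,
-- where n+1 copies of the current group's element still sit in front of t
theorem quadScan_runAux :
    ∀ (t : List (Int × Int)) (a : Int × Int) (n : Nat),
      quadScan (List.replicate (n + 1) a ++ t) = !((runAuxA a (n + 1) t).any (fun r => 3 < r)) := by
  intro t
  induction t with
  | nil =>
    intro a n
    simp only [List.append_nil, runAuxA, List.any_cons, List.any_nil, Bool.or_false]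
    exact quadScan_replicate a (n + 1)
  | cons b t ih =>
    intro a n
    by_cases hb : b = a
    · subst hb
      have h1 : List.replicate (n + 1) b ++ b :: t = List.replicate (n + 2) b ++ t := by
        rw [List.replicate_succ' (n := n + 1)]
        simp
      rw [h1]
      have h2 : runAuxA b (n + 1) (b :: t) = runAuxA b (n + 2) t := by
        simp [runAuxA]
      rw [h2]
      exact ih b (n + 1)
    · have hba : runAuxA a (n + 1) (b :: t) = (n + 1) :: runAuxA b 1 t := by
        simp [runAuxA, hb]
      rw [hba]
      simp only [List.any_cons, Bool.not_or]
      by_cases h3 : 3 < n + 1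
      · -- run already too long: the front window is all a
        obtain ⟨m, hm⟩ : ∃ m, n = m + 3 := ⟨n - 3, by omega⟩
        subst hm
        have : List.replicate (m + 3 + 1) a ++ b :: t
            = a :: a :: a :: a :: (List.replicate m a ++ b :: t) := by
          simp [List.replicate_succ]
        rw [this]
        simp [quadScan, h3]
      · -- short run: the scan slides past the a's onto b :: t
        have hab : a ≠ b := fun h => hb h.symm
        have hn2 : n ≤ 2 := by omega
        have hgoal : quadScan (List.replicate (n + 1) a ++ b :: t) = quadScan (b :: t) := by
          interval_cases n
          · rw [show List.replicate 1 a ++ b :: t = a :: b :: t from rfl]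
            rw [quadScan_cons, headWin_ne1 hab, Bool.true_and]
          · rw [show List.replicate 2 a ++ b :: t = a :: a :: b :: t from rfl]
            rw [quadScan_cons, headWin_ne2 hab, Bool.true_and,
                quadScan_cons, headWin_ne1 hab, Bool.true_and]
          · rw [show List.replicate 3 a ++ b :: t = a :: a :: a :: b :: t from rfl]
            rw [quadScan_cons, headWin_ne3 hab, Bool.true_and,
                quadScan_cons, headWin_ne2 hab, Bool.true_and,
                quadScan_cons, headWin_ne1 hab, Bool.true_and]
        rw [hgoal]
        have hrun : quadScan (b :: t) = !((runAuxA b 1 t).any (fun r => 3 < r)) := ih b 0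
        rw [hrun]
        simp [h3]

theorem quadScan_eq_runLens (l : List (Int × Int)) :
    quadScan l = !((runLensA l).any (fun r => 3 < r)) := by
  match l with
  | [] => rfl
  | a :: t =>
    have := quadScan_runAux t a 0
    simpa [runLensA] using this

-- ===== VERDICT (by name: the statement is the Claim_ definition above) =====
theorem is_path_valid_spec : Claim_equal_is_path_valid := by
  intro path _
  unfold Spec_is_path_valid is_path_valid is_path_valid_alt
  rw [PySem.List.slice_to_neg_one, PySem.List.slice_from_one, zipWith_dropLast_tail]
  rw [quadScan_eq_runLens]
  cases h : (runLensA (List.zipWith (fun p q => (q.1 - p.1, q.2 - p.2)) path path.tail)).any (fun r => 3 < r) <;> simp [h]
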